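-- pv_equiv track=rewrite | github.com/pazcharles02/Charles-Paz-Yahtzee-Project | yahtzee.py | is_small_straight
-- ===== SOURCE A (Python) =====
-- def is_small_straight(chosen_dice: list) -> bool:
--     """Determine if the roll is a small straight
--
--     3 and 4 are vital numbers in a small straight because the user can only have 5 dice in a list, therefore if they
--     were to get a small straight, which is 4 consecutive numbers, 3 and 4 have to be among those consecutive numbers
--
--     :param chosen_dice: a list of dice of length 5 that the user has chosen to keep or been forced to keep after 3 turns
--     :precondition: numbers in chosen_dice must greater than 0 and less than 7
--     :return: a boolean based on whether or not the chosen_dice list qualifies for a small straight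
--     >>> is_small_straight([1, 2, 3, 4, 6])
--     True
--     >>> is_small_straight([2, 3, 4, 5, 5])
--     True
--     >>> is_small_straight([1, 3, 4, 5, 6])
--     True
--     >>> is_small_straight([2, 3, 3, 5, 5])
--     False
--     """
--     if len(set(chosen_dice)) >= 4 and 4 in chosen_dice and 3 in chosen_dice:
--         number_of_times_next_number_minus_current_number_equals_one = 0
--         current_hand = sorted(list(set(chosen_dice)))
--         index_counter = 1
--         for die in current_hand:
--             try:
--                 if (die + 1) == current_hand[index_counter]:
--                     number_of_times_next_number_minus_current_number_equals_one += 1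
--                 index_counter += 1
--             except IndexError:
--                 return number_of_times_next_number_minus_current_number_equals_one >= 3
--     else:
--         return False
-- ===== SOURCE B (Python) =====
-- def is_small_straight(chosen_dice: list) -> bool:
--     s = set(chosen_dice)
--     return 3 in s and 4 in s and sum(1 for v in s if v + 1 in s) >= 3
-- ===== Notes on version B (the rewrite author's own statement) =====
-- stated objective: simpler
-- what changed: Replaces A's sort-then-index-walk with try/except by directly counting, over the set of dice, the values v with v+1 also present (which equals A's adjacent diff-1 pair count on the sorted distinct values); the redundant len(set)>=4 guard disappears since 3 successor pairs already force 4 distinct values.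
import Mathlib
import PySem

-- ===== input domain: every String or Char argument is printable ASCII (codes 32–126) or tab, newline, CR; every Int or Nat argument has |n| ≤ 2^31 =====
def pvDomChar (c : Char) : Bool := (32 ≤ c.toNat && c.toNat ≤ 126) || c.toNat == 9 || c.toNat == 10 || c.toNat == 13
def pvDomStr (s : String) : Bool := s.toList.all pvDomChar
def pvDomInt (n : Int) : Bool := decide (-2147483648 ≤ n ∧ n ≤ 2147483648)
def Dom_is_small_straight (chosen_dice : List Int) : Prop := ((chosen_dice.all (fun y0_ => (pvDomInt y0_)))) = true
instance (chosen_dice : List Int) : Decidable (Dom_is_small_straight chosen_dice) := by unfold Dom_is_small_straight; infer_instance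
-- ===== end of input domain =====

-- B replaces A's sort-then-index-walk (with try/except) by counting over the set the values v
-- with v+1 also present — a simpler, sort-free formulation of the same predicate.

-- ===== PORT A =====
-- the 'for die in current_hand' loop: state = (index_counter, count); the IndexError branch
-- (current_hand[index_counter] out of range) returns count >= 3
def pvLoopA (hand : List Int) (rest : List Int) (idx : Int) (count : Int) : Bool :=
  match rest with
  | [] => false  -- loop falls off the end: Python would return None; unreachable, since the
                 -- guard forces hand ≠ [] and the last iteration always hits the IndexError return
  | die :: rest' =>
    match PySem.List.pyGet? hand idx with
    | none => decide (count ≥ 3)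
    | some x => pvLoopA hand rest' (idx + 1) (if die + 1 == x then count + 1 else count)

def is_small_straight (chosen_dice : List Int) : Bool :=
  let s : PySem.Set Int := PySem.Set.ofList chosen_dice
  if decide (PySem.Set.len s ≥ 4) && chosen_dice.contains 4 && chosen_dice.contains 3 then
    let current_hand := PySem.List.sorted s (fun x => x) false
    pvLoopA current_hand current_hand 1 0
  else
    false

-- ===== PORT B =====
def is_small_straight_alt (chosen_dice : List Int) : Bool :=
  let s : PySem.Set Int := PySem.Set.ofList chosen_dice
  PySem.Set.contains s 3 && PySem.Set.contains s 4 &&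
    decide (((s.filter (fun v => PySem.Set.contains s (v + 1))).map (fun _ => (1 : Int))).sum ≥ 3)

-- ===== PRECONDITION & SPEC =====
def Spec_is_small_straight (chosen_dice : List Int) (out : Bool) : Prop := out = is_small_straight_alt chosen_dice
instance (chosen_dice : List Int) (out : Bool) : Decidable (Spec_is_small_straight chosen_dice out) := by unfold Spec_is_small_straight; infer_instance

-- ===== CLAIM (what is proved, stated in full; the proofs are below) =====
def Claim_equal_is_small_straight : Prop := ∀ (chosen_dice : List Int), Dom_is_small_straight chosen_dice → Spec_is_small_straight chosen_dice (is_small_straight chosen_dice)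

-- ===== LEMMAS AND PROOFS =====

-- number of adjacent pairs differing by exactly one
def pvAdj : List Int → Int
  | a :: b :: t => (if a + 1 = b then 1 else 0) + pvAdj (b :: t)
  | _ => 0

theorem pvAdj_le : ∀ (a : Int) (t : List Int), pvAdj (a :: t) ≤ (t.length : Int) := by
  intro a t
  induction t generalizing a with
  | nil => simp [pvAdj]
  | cons b t ih =>
    have := ih b
    simp only [pvAdj, List.length_cons]
    split_ifs <;> push_cast <;> omega

theorem pvLoopA_eq : ∀ (rest pre : List Int) (count : Int) (hand : List Int),
    hand = pre ++ rest → rest ≠ [] →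
    pvLoopA hand rest ((pre.length : Int) + 1) count = decide (count + pvAdj rest ≥ 3) := by
  intro rest
  induction rest with
  | nil => intro _ _ _ _ h; exact absurd rfl h
  | cons die rest' ih =>
    intro pre count hand hh _
    subst hh
    match rest' with
    | [] =>
      have hnone : PySem.List.pyGet? (pre ++ [die]) ((pre.length : Int) + 1) = none := by
        simpa using PySem.List.pyGet?_append_right pre [die] 1
      conv_lhs => rw [pvLoopA.eq_def]
      simp [hnone, pvAdj]
    | x :: t =>
      have hget : PySem.List.pyGet? (pre ++ die :: x :: t) ((pre.length : Int) + 1) = some x := by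
        simpa using PySem.List.pyGet?_append_right pre (die :: x :: t) 1
      have hlen : ((pre.length : Int) + 1) + 1 = (((pre ++ [die]).length : Int) + 1) := by
        simp
      have hih := ih (pre ++ [die]) (if die + 1 == x then count + 1 else count)
        (pre ++ die :: x :: t) (by simp) (by simp)
      conv_lhs => rw [pvLoopA.eq_def]
      simp only [hget, hlen, hih]
      by_cases h : die + 1 = x <;>
        simp only [pvAdj, h, beq_iff_eq, decide_eq_decide,
          beq_self_eq_true, if_pos, if_neg, not_false_eq_true] <;> omega

-- in a strictly increasing list, v+1 is present iff it is the immediate successor of v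
theorem pvAdj_filter : ∀ (H : List Int), H.Pairwise (· < ·) →
    (((H.filter (fun v => H.contains (v + 1))).length : Int)) = pvAdj H := by
  intro H
  induction H with
  | nil => simp [pvAdj]
  | cons a t ih =>
    intro hp
    match t, hp with
    | [], _ => simp [pvAdj, List.filter]
    | b :: t, hp =>
      have hab : a < b := (List.pairwise_cons.1 hp).1 b (by simp)
      have hlt : ∀ y ∈ b :: t, a < y := (List.pairwise_cons.1 hp).1
      have htp : (b :: t).Pairwise (· < ·) := (List.pairwise_cons.1 hp).2
      -- head condition: a+1 ∈ a :: b :: t ↔ a+1 = b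
      have hhead : (a :: b :: t).contains (a + 1) = decide (a + 1 = b) := by
        by_cases h : a + 1 = b
        · simp [h]
        · have h3 : a + 1 ∉ t := by
            intro hc
            have : b < a + 1 := (List.pairwise_cons.1 htp).1 _ hc
            omega
          simp only [List.contains_eq_mem]
          have : ¬ (a + 1 = a) := by omega
          simp [h, this, h3]
      -- tail elements: membership of v+1 in the full list = membership in the tail
      have htail : (b :: t).filter (fun v => (a :: b :: t).contains (v + 1))
          = (b :: t).filter (fun v => (b :: t).contains (v + 1)) := by
        apply List.filter_congr
        intro v hv
        have hav : a < v := hlt v hv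
        simp only [List.contains_eq_mem]
        have : ¬ (v + 1 = a) := by omega
        simp [this]
      have hihv := ih htp
      rw [List.filter_cons, hhead, htail]
      simp only [pvAdj, decide_eq_true_eq]
      split_ifs with h
      · simp only [List.length_cons]; push_cast; omega
      · omega

-- ===== VERDICT (by name: the statement is the Claim_ definition above) =====
theorem is_small_straight_spec : Claim_equal_is_small_straight := by
  intro cd _
  unfold Spec_is_small_straight is_small_straight is_small_straight_alt
  set s : PySem.Set Int := PySem.Set.ofList cd with hs
  set H := PySem.List.sorted s (fun x => x) false with hH
  have hperm : H.Perm s := PySem.List.sorted_perm ..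
  have hpw : H.Pairwise (· < ·) := PySem.List.sorted_ofList_pairwise_lt ..
  have hmem : ∀ y : Int, (y ∈ s) ↔ (y ∈ H) := fun y => (hperm.mem_iff (a := y)).symm
  have hm3 : ((3 : Int) ∈ s) ↔ ((3 : Int) ∈ cd) := PySem.Set.mem_ofList ..
  have hm4 : ((4 : Int) ∈ s) ↔ ((4 : Int) ∈ cd) := PySem.Set.mem_ofList ..
  have hfilter : (List.filter (fun v => decide (v + 1 ∈ s)) s).length
      = (List.filter (fun v => decide (v + 1 ∈ H)) H).length := by
    have h1 : (List.filter (fun v => decide (v + 1 ∈ s)) H).Perm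
        (List.filter (fun v => decide (v + 1 ∈ s)) s) := hperm.filter _
    have h2 : List.filter (fun v => decide (v + 1 ∈ s)) H
        = List.filter (fun v => decide (v + 1 ∈ H)) H := by
      apply List.filter_congr; intro v _
      simp [hmem (v + 1)]
    rw [← h1.length_eq, h2]
  have hAdjEq : ((List.filter (fun v => decide (v + 1 ∈ H)) H).length : Int) = pvAdj H := by
    simpa [List.contains_eq_mem] using pvAdj_filter H hpw
  have hlenH : H.length = s.length := PySem.List.length_sorted ..
  by_cases h3 : (3 : Int) ∈ cd
  · by_cases h4 : (4 : Int) ∈ cd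
    · simp only [PySem.Set.len, PySem.Set.contains_eq_listContains, List.contains_eq_mem,
        PySem.List.sum_map_const_int, h3, h4, hm3, hm4, decide_true, Bool.and_true,
        Bool.true_and, mul_one]
      by_cases hlen : 4 ≤ s.length
      · have hHne : H ≠ [] := by
          intro hnil; rw [hnil] at hlenH; simp only [List.length_nil] at hlenH; omega
        have hloop : pvLoopA H H 1 0 = decide ((0 : Int) + pvAdj H ≥ 3) := by
          simpa using pvLoopA_eq H [] 0 H (by simp) hHne
        rw [if_pos (by simpa using hlen), hloop]
        simp only [decide_eq_decide, ge_iff_le, zero_add]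
        omega
      · rw [if_neg (by simpa using hlen)]
        have hbound : pvAdj H < 3 := by
          match hm : H with
          | [] => simp [pvAdj]
          | a :: t =>
            have h1 := pvAdj_le a t
            simp only [List.length_cons] at hlenH
            omega
        rw [Bool.eq_iff_iff]
        simp only [Bool.false_eq_true, false_iff, decide_eq_true_eq]
        omega
    · simp [h4, hm4]
  · simp [h3, hm3]
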